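-- pv_equiv track=rewrite | github.com/juliusvoggesberger/auto-cen | auto_cen/utils/utils.py | process_configuration
-- ===== SOURCE A (Python) =====
-- def process_configuration(prefixes: list, algorithm: str, config: dict) -> dict:
--     """
--     Given a dictionary, split it up in the configurations of its included algorithms.
--
--     :param prefixes: The prefixes used by the ConfigSpace configurations for the different algorithms.
--     :param config: The combined configuration as a dict.
--     :param algorithm: The classifier algorithm
--     :return: The classification config. (dict), name of the diversity alg. (str), config. of
--     the diversity alg. (dict)
--     """
--     processed_configs = {}
--     for p in prefixes:
--         new_config = {k[len(p) + 1:]: v for k, v in config.items() if k.startswith(p)}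
--
--         if p != algorithm:
--             if not new_config:  # If the method (prefix) was not in the configuration, set it as empty
--                 processed_configs[p] = ('', {})
--             elif p == "ENS":
--                 new_config = {k.split(':')[-1]: v for k, v in new_config.items()}
--                 processed_configs[p] = ('size', new_config)
--             else:
--                 # For all non-classifiers another prefix has to be removed.
--                 algo = new_config.pop('algorithm')
--                 new_config = {k.split(':')[-1]: v for k, v in new_config.items()}
--                 processed_configs[p] = (algo, new_config)
--         else:
--             processed_configs[p] = (algorithm, new_config)
--     return processed_configs
-- ===== SOURCE B (Python) =====
-- def process_configuration(prefixes: list, algorithm: str, config: dict) -> dict: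
--     """Instead of rescanning config once per prefix with startswith, enumerate each
--     config key's own prefixes once and find matching prefixes by hash-set lookup
--     (O(N*L + P) grouping instead of O(P*N*L)), then shape each group."""
--     pset = set(prefixes)
--     groups = {p: [] for p in prefixes}
--     # Single pass: a key k matches prefix p iff p == k[:len(p)], so enumerate k's
--     # own prefixes (every cut point, including the whole key) and look them up.
--     for k, v in config.items():
--         for j in range(len(k) + 1):
--             p = k[:j]
--             if p in pset:
--                 groups[p].append((k[j + 1:], v))
--     out = {}
--     for p in prefixes:
--         sub = dict(groups[p])
--         if p == algorithm:
--             out[p] = (algorithm, sub)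
--         elif not sub:
--             out[p] = ('', {})
--         elif p == 'ENS':
--             out[p] = ('size', {k.split(':')[-1]: v for k, v in sub.items()})
--         else:
--             algo = sub['algorithm']
--             out[p] = (algo, {k.split(':')[-1]: v
--                              for k, v in sub.items() if k != 'algorithm'})
--     return out
-- ===== Notes on version B (the rewrite author's own statement) =====
-- stated objective: faster
-- what changed: A rescans the whole config once per prefix with startswith; B inverts the lookup: one pass over config that enumerates each key's own cut points and finds matching prefixes by hash-set membership (no startswith at all), collecting per-prefix item lists, followed by a shaping pass over the prefixes.
import Mathlib
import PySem

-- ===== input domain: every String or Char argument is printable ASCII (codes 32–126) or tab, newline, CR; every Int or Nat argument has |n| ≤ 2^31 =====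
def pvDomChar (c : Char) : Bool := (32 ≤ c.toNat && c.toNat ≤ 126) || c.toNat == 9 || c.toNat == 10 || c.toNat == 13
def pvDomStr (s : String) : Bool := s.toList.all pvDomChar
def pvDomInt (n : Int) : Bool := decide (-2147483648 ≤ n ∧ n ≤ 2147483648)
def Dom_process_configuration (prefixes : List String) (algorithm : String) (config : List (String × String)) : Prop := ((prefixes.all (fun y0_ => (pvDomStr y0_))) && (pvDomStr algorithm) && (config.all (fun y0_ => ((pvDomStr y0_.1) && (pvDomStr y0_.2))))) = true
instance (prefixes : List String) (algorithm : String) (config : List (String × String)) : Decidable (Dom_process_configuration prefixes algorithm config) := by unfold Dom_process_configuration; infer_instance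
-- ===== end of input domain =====

-- B replaces A's one-startswith-scan-of-config-per-prefix by a single pass over config that
-- enumerates each key's own cut points and finds matching prefixes by set membership,
-- then a shaping pass over the prefixes.

-- shared primitives of the Python source: k[len(p)+1:] and k.split(':')[-1]
def pcStrip (p k : String) : String := PySem.Str.slice k (some (PySem.Str.len p + 1)) none
def pcLast (k : String) : String := ((PySem.Str.split? k ":").getD []).getLastD ""

-- ===== PORT A =====
-- {k[len(p)+1:]: v for k, v in config.items() if k.startswith(p)}
def pcNewConfig (config : List (String × String)) (p : String) : PySem.Dict String String :=
  config.foldl (fun d kv => if PySem.Str.startswith kv.1 p then d.insert (pcStrip p kv.1) kv.2 else d) PySem.Dict.empty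

-- {k.split(':')[-1]: v for k, v in d.items()}
def pcRekey (d : PySem.Dict String String) : PySem.Dict String String :=
  d.items.foldl (fun d' kv => d'.insert (pcLast kv.1) kv.2) PySem.Dict.empty

-- literal port of A; new_config.pop('algorithm') is ported as getD '' + erase: the KeyError
-- case (key absent) is excluded by Pre_process_configuration below.
def process_configuration (prefixes : List String) (algorithm : String) (config : List (String × String)) : List (String × String × (List (String × String))) :=
  (prefixes.foldl (fun acc p =>
    let nc := pcNewConfig config p
    if p ≠ algorithm then
      if nc.items = [] then acc.insert p ("", ([] : List (String × String)))
      else if p = "ENS" then acc.insert p ("size", (pcRekey nc).items)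
      else acc.insert p (nc.getD "algorithm" "", (pcRekey (nc.erase "algorithm")).items)
    else acc.insert p (algorithm, nc.items)) PySem.Dict.empty).items

-- ===== PORT B =====
-- for j in range(len(k) + 1): p = k[:j]; if p in pset: groups[p].append((k[j+1:], v))
def pcCuts (pset : PySem.Set String) (kv : String × String)
    (g : PySem.Dict String (List (String × String))) : PySem.Dict String (List (String × String)) :=
  (PySem.List.pyRange 0 ((PySem.Str.len kv.1 : Int) + 1)).foldl (fun g' j =>
    let p := PySem.Str.slice kv.1 none (some j)
    if pset.contains p then
      g'.modify p [] (fun l => l ++ [(PySem.Str.slice kv.1 (some (j + 1)) none, kv.2)])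
    else g') g

-- groups = {p: [] for p in prefixes}; for k, v in config.items(): <cut-point loop>
def pcGroups (prefixes : List String) (pset : PySem.Set String) (config : List (String × String)) : PySem.Dict String (List (String × String)) :=
  config.foldl (fun g kv => pcCuts pset kv g)
    (prefixes.foldl (fun g p => g.insert p ([] : List (String × String))) PySem.Dict.empty)

-- the shaping of one prefix's sub-dict; sub['algorithm'] ported as getD '' (KeyError excluded by Pre_)
def pcShape (algorithm p : String) (sub : PySem.Dict String String) : String × List (String × String) :=
  if p = algorithm then (algorithm, sub.items)
  else if sub.items = [] then ("", [])
  else if p = "ENS" then ("size", (sub.items.foldl (fun d kv => d.insert (pcLast kv.1) kv.2) PySem.Dict.empty).items)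
  else (sub.getD "algorithm" "",
    (((sub.items.filter (fun kv => kv.1 != "algorithm")).foldl (fun d kv => d.insert (pcLast kv.1) kv.2)) PySem.Dict.empty).items)

def process_configuration_alt (prefixes : List String) (algorithm : String) (config : List (String × String)) : List (String × String × (List (String × String))) :=
  let pset := PySem.Set.ofList prefixes
  let groups := pcGroups prefixes pset config
  (prefixes.foldl (fun out p => out.insert p (pcShape algorithm p (PySem.Dict.ofList (groups.getD p [])))) PySem.Dict.empty).items

-- ===== PRECONDITION & SPEC =====
-- Pre_ excludes exactly the inputs on which Python A raises KeyError: some prefix p other than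
-- the algorithm and "ENS" matches at least one config key but none of its stripped keys is 'algorithm'.
def Pre_process_configuration (prefixes : List String) (algorithm : String) (config : List (String × String)) : Prop :=
  ∀ p ∈ prefixes, p ≠ algorithm → p ≠ "ENS" →
    (config.filter (fun kv => PySem.Str.startswith kv.1 p)) ≠ [] →
    "algorithm" ∈ (config.filter (fun kv => PySem.Str.startswith kv.1 p)).map (fun kv => pcStrip p kv.1)
instance (prefixes : List String) (algorithm : String) (config : List (String × String)) : Decidable (Pre_process_configuration prefixes algorithm config) := by unfold Pre_process_configuration; infer_instance
def pvWitness_process_configuration : List String × String × (List (String × String)) :=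
  (["RF", "ENS"], "RF", [("RF:a", "1"), ("ENS:x", "3")])
def Spec_process_configuration (prefixes : List String) (algorithm : String) (config : List (String × String)) (out : List (String × String × (List (String × String)))) : Prop := out = process_configuration_alt prefixes algorithm config
instance (prefixes : List String) (algorithm : String) (config : List (String × String)) (out : List (String × String × (List (String × String)))) : Decidable (Spec_process_configuration prefixes algorithm config out) := by unfold Spec_process_configuration; infer_instance

-- ===== CLAIM (what is proved, stated in full; the proofs are below) =====
def Claim_equal_process_configuration : Prop := ∀ (prefixes : List String) (algorithm : String) (config : List (String × String)), Dom_process_configuration prefixes algorithm config → Pre_process_configuration prefixes algorithm config → Spec_process_configuration prefixes algorithm config (process_configuration prefixes algorithm config)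

-- ===== LEMMAS AND PROOFS =====

-- the grouped items of a prefix p, as A collects them: config filtered by startswith, keys stripped
def pcF (config : List (String × String)) (p : String) : List (String × String) :=
  (config.filter (fun kv => PySem.Str.startswith kv.1 p)).map (fun kv => (pcStrip p kv.1, kv.2))

-- k[:j] = p exactly when j = len p and k starts with p (for j within k)
theorem pc_cut_eq_iff (k p : String) (j : Nat) (hj : j ≤ k.toList.length) :
    PySem.Str.slice k none (some (j : Int)) = p ↔ (j = p.toList.length ∧ PySem.Str.startswith k p = true) := by
  have hs : (PySem.Str.slice k none (some (j : Int))).toList = k.toList.take j := by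
    simp [PySem.Str.toList_slice, PySem.List.slice_to_natCast]
  constructor
  · intro h
    have ht : k.toList.take j = p.toList := by rw [← hs, h]
    have hlen : j = p.toList.length := by
      have := congrArg List.length ht
      rw [List.length_take] at this
      omega
    refine ⟨hlen, ?_⟩
    rw [PySem.Str.startswith_eq, PySem.Chars.startswith_iff]
    exact ⟨k.toList.drop j, by rw [← ht]; simp⟩
  · rintro ⟨hlen, hsw⟩
    rw [PySem.Str.startswith_eq, PySem.Chars.startswith_iff] at hsw
    have ht : k.toList.take j = p.toList := by
      rw [hlen]; exact (List.prefix_iff_eq_take.mp hsw).symm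
    have : (PySem.Str.slice k none (some (j : Int))).toList = p.toList := by rw [hs, ht]
    exact String.toList_injective this
  
-- one config key's cut-point loop, restricted to a distinct in-range cut list:
-- at key p it appends the stripped item iff some cut j hits p (j = len p, startswith, p in pset)
theorem pc_cuts_aux (pset : PySem.Set String) (kv : String × String) (l : List Nat)
    (hnd : l.Nodup) (hle : ∀ j ∈ l, j ≤ kv.1.toList.length)
    (g : PySem.Dict String (List (String × String))) (p : String) :
    ((l.map (fun (j : Nat) => (j : Int))).foldl (fun g' j =>
        if pset.contains (PySem.Str.slice kv.1 none (some j)) then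
          g'.modify (PySem.Str.slice kv.1 none (some j)) []
            (fun l => l ++ [(PySem.Str.slice kv.1 (some (j + 1)) none, kv.2)])
        else g') g).getD p [] =
      g.getD p [] ++
        (if p.toList.length ∈ l ∧ PySem.Str.startswith kv.1 p = true ∧ pset.contains p = true
         then [(pcStrip p kv.1, kv.2)] else []) := by
  induction l generalizing g with
  | nil => simp
  | cons j t ih =>
    have hj : j ≤ kv.1.toList.length := hle j (List.mem_cons_self ..)
    have hjt : j ∉ t := (List.nodup_cons.mp hnd).1
    have hndt : t.Nodup := (List.nodup_cons.mp hnd).2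
    have hlet : ∀ i ∈ t, i ≤ kv.1.toList.length := fun i hi => hle i (List.mem_cons_of_mem _ hi)
    simp only [List.map_cons, List.foldl_cons]
    rw [ih hndt hlet]
    by_cases hq : PySem.Str.slice kv.1 none (some (j : Int)) = p
    · obtain ⟨hlen, hsw⟩ := (pc_cut_eq_iff kv.1 p j hj).mp hq
      have hsw' : PySem.Chars.startswith kv.1.toList p.toList = true := by
        simpa [PySem.Str.startswith_eq] using hsw
      by_cases hc : pset.contains p = true
      · have hstep : (if pset.contains (PySem.Str.slice kv.1 none (some (j : Int))) = true then
            g.modify (PySem.Str.slice kv.1 none (some (j : Int))) []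
              (fun l => l ++ [(PySem.Str.slice kv.1 (some ((j : Int) + 1)) none, kv.2)])
            else g) =
            g.modify p [] (fun l => l ++ [(pcStrip p kv.1, kv.2)]) := by
          rw [hq, if_pos hc]
          have : ((j : Int) + 1) = PySem.Str.len p + 1 := by
            simp [PySem.Str.len, hlen]
          rw [this]
          rfl
        rw [hstep, PySem.Dict.getD_modify, if_pos rfl]
        have hnt : p.toList.length ∉ t := fun hm => hjt (hlen ▸ hm)
        have hc' : p ∈ pset := by simpa using hc
        have hlen' : p.length = j := by rw [hlen, String.length_toList]
        simp [hsw', hc', hlen', hjt, String.length_toList]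
      · have hstep : (if pset.contains (PySem.Str.slice kv.1 none (some (j : Int))) = true then
            g.modify (PySem.Str.slice kv.1 none (some (j : Int))) []
              (fun l => l ++ [(PySem.Str.slice kv.1 (some ((j : Int) + 1)) none, kv.2)])
            else g) = g := by rw [hq, if_neg hc]
        rw [hstep]
        have hc' : p ∉ pset := by simpa using hc
        simp [hc']
    · have hgd : (if pset.contains (PySem.Str.slice kv.1 none (some (j : Int))) = true then
          g.modify (PySem.Str.slice kv.1 none (some (j : Int))) []
            (fun l => l ++ [(PySem.Str.slice kv.1 (some ((j : Int) + 1)) none, kv.2)])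
          else g).getD p [] = g.getD p [] := by
        split_ifs with h1
        · rw [PySem.Dict.getD_modify, if_neg (fun h : p = PySem.Str.slice kv.1 none (some (j : Int)) => hq h.symm)]
        · rfl
      rw [hgd]
      congr 1
      by_cases hsw : PySem.Chars.startswith kv.1.toList p.toList = true
      · have hne : p.length ≠ j := by
          intro h
          exact hq ((pc_cut_eq_iff kv.1 p j hj).mpr
            ⟨by rw [← h, String.length_toList], by simpa [PySem.Str.startswith_eq] using hsw⟩)
        simp [hsw, hne, String.length_toList]
      · simp [hsw]

-- the whole grouping fold, read at a key p of the set: exactly A's filtered stripped items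
theorem pc_groups_getD (prefixes : List String) (config : List (String × String)) (p : String)
    (hp : p ∈ prefixes) :
    (pcGroups prefixes (PySem.Set.ofList prefixes) config).getD p [] = pcF config p := by
  have hc : (PySem.Set.ofList prefixes).contains p = true := by
    simpa using (PySem.Set.mem_ofList prefixes p).mpr hp
  -- one config key's cut loop appends its stripped item iff the key starts with p
  have hcuts : ∀ (g : PySem.Dict String (List (String × String))) (kv : String × String),
      (pcCuts (PySem.Set.ofList prefixes) kv g).getD p [] =
        g.getD p [] ++ (if PySem.Str.startswith kv.1 p then [(pcStrip p kv.1, kv.2)] else []) := by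
    intro g kv
    have hr : PySem.List.pyRange 0 ((PySem.Str.len kv.1 : Int) + 1) =
        ((List.range (kv.1.toList.length + 1)).map (fun (j : Nat) => (j : Int))) := by
      have h1 : (PySem.Str.len kv.1 : Int) + 1 = ((kv.1.toList.length + 1 : Nat) : Int) := by
        simp [PySem.Str.len]
      rw [h1, PySem.List.pyRange_zero_natCast]
    have h2 := pc_cuts_aux (PySem.Set.ofList prefixes) kv (List.range (kv.1.toList.length + 1))
      List.nodup_range (fun j hj => Nat.lt_succ_iff.mp (List.mem_range.mp hj)) g p
    have hcond : (p.toList.length ∈ List.range (kv.1.toList.length + 1) ∧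
        PySem.Str.startswith kv.1 p = true ∧ (PySem.Set.ofList prefixes).contains p = true) ↔
        (PySem.Str.startswith kv.1 p = true) := by
      constructor
      · rintro ⟨-, hsw, -⟩; exact hsw
      · intro hsw
        refine ⟨?_, hsw, hc⟩
        rw [List.mem_range]
        have : p.toList <+: kv.1.toList := by
          rw [PySem.Str.startswith_eq, PySem.Chars.startswith_iff] at hsw; exact hsw
        have := this.length_le
        omega
    rw [show pcCuts (PySem.Set.ofList prefixes) kv g =
        (((List.range (kv.1.toList.length + 1)).map (fun (j : Nat) => (j : Int))).foldl (fun g' j =>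
          if (PySem.Set.ofList prefixes).contains (PySem.Str.slice kv.1 none (some j)) then
            g'.modify (PySem.Str.slice kv.1 none (some j)) []
              (fun l => l ++ [(PySem.Str.slice kv.1 (some (j + 1)) none, kv.2)])
          else g') g) from by rw [pcCuts, hr]]
    rw [h2]
    congr 1
    simp only [hcond]
  -- the whole config fold, with a general start dict
  have hmain : ∀ (cfg : List (String × String)) (g : PySem.Dict String (List (String × String))),
      (cfg.foldl (fun g kv => pcCuts (PySem.Set.ofList prefixes) kv g) g).getD p [] =
        g.getD p [] ++ pcF cfg p := by
    intro cfg
    induction cfg with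
    | nil => intro g; simp [pcF]
    | cons kv t ih =>
      intro g
      rw [List.foldl_cons, ih, hcuts]
      by_cases hsw : PySem.Chars.startswith kv.1.toList p.toList = true
      · simp [pcF, hsw]
      · simp [pcF, hsw]
  -- the initial {p: [] for p in prefixes} reads [] at every key
  have hinit : ∀ (l : List String) (g : PySem.Dict String (List (String × String))),
      (∀ q, g.getD q [] = []) →
      ∀ q, (l.foldl (fun g p => g.insert p ([] : List (String × String))) g).getD q [] = [] := by
    intro l
    induction l with
    | nil => intro g h q; simpa using h q
    | cons r t ih =>
      intro g h q
      rw [List.foldl_cons]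
      refine ih _ (fun q' => ?_) q
      rw [PySem.Dict.getD_insert]
      split_ifs
      · rfl
      · exact h q'
  unfold pcGroups
  rw [hmain, hinit prefixes PySem.Dict.empty (fun q => PySem.Dict.getD_empty q []) p]
  simp

-- inserting the grouped items of p into a dict is A's per-prefix comprehension
theorem pc_dict_ofF (config : List (String × String)) (p : String) :
    PySem.Dict.ofList (pcF config p) = pcNewConfig config p := by
  unfold pcF pcNewConfig PySem.Dict.ofList PySem.Dict.update
  rw [List.foldl_map, List.foldl_filter]

-- shaping a grouped sub-dict is exactly A's branch on the same dict
theorem pc_shape_eq (algorithm p : String) (config : List (String × String)) :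
    pcShape algorithm p (pcNewConfig config p) =
      (if p ≠ algorithm then
        (if (pcNewConfig config p).items = [] then ("", ([] : List (String × String)))
         else if p = "ENS" then ("size", (pcRekey (pcNewConfig config p)).items)
         else ((pcNewConfig config p).getD "algorithm" "", (pcRekey ((pcNewConfig config p).erase "algorithm")).items))
      else (algorithm, (pcNewConfig config p).items)) := by
  unfold pcShape pcRekey
  split_ifs <;> first | rfl | tauto

-- ===== VERDICT (by name: the statement is the Claim_ definition above) =====
theorem process_configuration_spec : Claim_equal_process_configuration := by
  intro prefixes algorithm config _hdom _hpre
  unfold Spec_process_configuration process_configuration process_configuration_alt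
  dsimp only
  congr 1
  refine PySem.List.foldl_congr_mem prefixes _ _ _ ?_
  intro acc p hp
  rw [pc_groups_getD prefixes config p hp, pc_dict_ofF, pc_shape_eq]
  split_ifs <;> rfl
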